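-- pv_equiv track=rewrite | github.com/karl-johnson/PTtoDZI | misctools.py | getTilingRegions
-- ===== SOURCE A (Python) =====
-- import math
--
-- def getTilingRegions(x_size, y_size, tile_size):
--     # first get no. of tiles in x and y
--     num_x = math.ceil(x_size/tile_size)
--     num_y = math.ceil(y_size/tile_size)
--     output = []
--     for row in range(num_y):
--         for col in range(num_x):
--             x_start = col*tile_size
--             y_start = row*tile_size
--             x_end = min((col+1)*tile_size, x_size) # limit to region
--             y_end = min((row+1)*tile_size, y_size)
--             output.append([x_start, y_start, x_end-x_start, y_end-y_start])
--     return output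
-- ===== SOURCE B (Python) =====
-- def getTilingRegions(x_size, y_size, tile_size):
--     # boundary cut-points per axis; each tile extent is the difference of consecutive cut-points
--     rx = range(0, x_size, tile_size)
--     ry = range(0, y_size, tile_size)
--     if not rx or not ry:
--         return []
--     bx = list(rx) + [x_size]
--     by = list(ry) + [y_size]
--     return [[x0, y0, x1 - x0, y1 - y0]
--             for y0, y1 in zip(by, by[1:])
--             for x0, x1 in zip(bx, bx[1:])]
-- ===== Notes on version B (the rewrite author's own statement) =====
-- stated objective: simpler
-- what changed: B computes per-axis boundary cut-point lists with range(0, size, tile_size)+[size] and obtains each tile's start and extent as consecutive cut-points and their difference, eliminating A's math.ceil tile counts and the per-tile min() clamping.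
-- outside the precondition, e.g. on getTilingRegions(10, 10, 0): A raises ZeroDivisionError, B raises ValueError
import Mathlib
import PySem

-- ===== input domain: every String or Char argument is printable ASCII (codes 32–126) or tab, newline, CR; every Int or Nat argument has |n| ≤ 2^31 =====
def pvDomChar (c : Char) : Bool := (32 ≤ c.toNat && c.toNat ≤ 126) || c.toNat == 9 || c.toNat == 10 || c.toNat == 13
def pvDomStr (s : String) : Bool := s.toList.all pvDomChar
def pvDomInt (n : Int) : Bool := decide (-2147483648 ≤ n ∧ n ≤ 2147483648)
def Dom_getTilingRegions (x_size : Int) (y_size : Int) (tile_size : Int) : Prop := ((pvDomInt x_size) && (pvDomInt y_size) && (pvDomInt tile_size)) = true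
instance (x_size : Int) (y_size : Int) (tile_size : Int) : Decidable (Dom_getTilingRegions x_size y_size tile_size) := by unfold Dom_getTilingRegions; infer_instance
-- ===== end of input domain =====

-- B replaces A's per-tile min-clamping under a math.ceil tile count by per-axis
-- boundary cut-point lists whose consecutive differences are the tile extents.

-- ===== PORT A =====
-- math.ceil(a/b): on Dom (|args| ≤ 2^31) Python's float division followed by
-- ceil is exact and equals integer ceiling division -((-a)//b); ported so.
def pyCeilDiv (a b : Int) : Int := -(PySem.Int.floordiv (-a) b)

def getTilingRegions (x_size : Int) (y_size : Int) (tile_size : Int) : List (List Int) :=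
  let num_x := pyCeilDiv x_size tile_size
  let num_y := pyCeilDiv y_size tile_size
  (PySem.List.pyRange 0 num_y 1).foldl (fun output row =>
    (PySem.List.pyRange 0 num_x 1).foldl (fun output col =>
      let x_start := col * tile_size
      let y_start := row * tile_size
      let x_end := min ((col + 1) * tile_size) x_size
      let y_end := min ((row + 1) * tile_size) y_size
      output ++ [[x_start, y_start, x_end - x_start, y_end - y_start]]) output) []

-- ===== PORT B =====
def getTilingRegions_alt (x_size : Int) (y_size : Int) (tile_size : Int) : List (List Int) :=
  let rx := PySem.List.pyRange 0 x_size tile_size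
  let ry := PySem.List.pyRange 0 y_size tile_size
  if rx = [] ∨ ry = [] then [] else
  let bx := rx ++ [x_size]
  let by_ := ry ++ [y_size]
  (by_.zip by_.tail).flatMap (fun p =>
    (bx.zip bx.tail).map (fun q => [q.1, p.1, q.2 - q.1, p.2 - p.1]))

-- ===== PRECONDITION & SPEC =====
-- Pre_ excludes tile_size = 0, where A raises ZeroDivisionError, and the meaningless
-- corner of a negative tile_size with BOTH sizes negative, where A's min() clamping and
-- B's uniform partition produce different accidental values neither of which anyone
-- would specify (for a negative tile_size with either size nonnegative both return []).
def Pre_getTilingRegions (x_size : Int) (y_size : Int) (tile_size : Int) : Prop :=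
  tile_size ≠ 0 ∧ (0 < tile_size ∨ 0 ≤ x_size ∨ 0 ≤ y_size)
instance (x_size : Int) (y_size : Int) (tile_size : Int) : Decidable (Pre_getTilingRegions x_size y_size tile_size) := by unfold Pre_getTilingRegions; infer_instance
def pvWitness_getTilingRegions : Int × Int × Int := (10, 7, 4)

def Spec_getTilingRegions (x_size : Int) (y_size : Int) (tile_size : Int) (out : List (List Int)) : Prop := out = getTilingRegions_alt x_size y_size tile_size
instance (x_size : Int) (y_size : Int) (tile_size : Int) (out : List (List Int)) : Decidable (Spec_getTilingRegions x_size y_size tile_size out) := by unfold Spec_getTilingRegions; infer_instance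

-- ===== CLAIM (what is proved, stated in full; the proofs are below) =====
def Claim_equal_getTilingRegions : Prop := ∀ (x_size : Int) (y_size : Int) (tile_size : Int), Dom_getTilingRegions x_size y_size tile_size → Pre_getTilingRegions x_size y_size tile_size → Spec_getTilingRegions x_size y_size tile_size (getTilingRegions x_size y_size tile_size)

-- ===== LEMMAS AND PROOFS =====

-- One axis, positive step: the consecutive pairs of B's cut-point list are exactly
-- A's (start, clamped end) pairs over the ceil-division tile count.
theorem pvAxisPairs (s t : Int) (ht : 0 < t) :
    ((PySem.List.pyRange 0 s t ++ [s]).zip (PySem.List.pyRange 0 s t ++ [s]).tail)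
      = (PySem.List.pyRange 0 (pyCeilDiv s t) 1).map
          (fun c => (c * t, min ((c + 1) * t) s)) := by
  have hbr : (pyCeilDiv s t - 1) * t < s ∧ s ≤ pyCeilDiv s t * t :=
    (PySem.Int.neg_floordiv_neg_eq_iff_of_pos ht).mp rfl
  set n := pyCeilDiv s t with hn
  have hm : (if (0:Int) < s then ((s - 0 + t - 1) / t).toNat else 0) = n.toNat := by
    by_cases hs : (0:Int) < s
    · simp only [if_pos hs]
      congr 1
      have : PySem.Int.floordiv (s - 0 + t - 1) t = n := by
        rw [PySem.Int.floordiv_eq_iff_of_pos ht]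
        constructor <;> nlinarith [hbr.1, hbr.2]
      rw [← PySem.Int.floordiv_eq_ediv_of_pos ht, this]
    · simp only [if_neg hs]
      have : n ≤ 0 := by nlinarith [hbr.1, hbr.2]
      omega
  rw [PySem.List.pyRange_of_pos 0 s ht, hm, PySem.List.pyRange_one]
  simp only [sub_zero]
  apply List.ext_getElem
  · simp
  · intro i h1 h2
    simp only [List.length_zip, List.length_tail, List.length_append, List.length_map,
      List.length_range, List.length_cons, List.length_nil] at h1
    have hi : i < n.toNat := by omega
    have hcast : ((n.toNat : Int)) = n := by omega
    rw [List.getElem_zip, List.getElem_tail]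
    simp only [List.getElem_map, List.getElem_range]
    rw [List.getElem_append_left (by simpa using hi)]
    simp only [List.getElem_map, List.getElem_range]
    by_cases hlast : i + 1 < n.toNat
    · rw [List.getElem_append_left (by simpa using hlast)]
      simp only [List.getElem_map, List.getElem_range, zero_add]
      have hle : ((i:Int) + 1) * t ≤ s := by
        have h1 : ((i:Int) + 1) ≤ n - 1 := by omega
        nlinarith [hbr.1]
      simp only [Prod.mk.injEq]
      constructor
      · ring
      · rw [min_eq_left hle]; push_cast; ring
    · have heq : i + 1 = n.toNat := by omega
      rw [List.getElem_append_right (by simp [heq])]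
      have hge : s ≤ ((i:Int) + 1) * t := by
        have : ((i:Int) + 1) = n := by omega
        rw [this]; exact hbr.2
      simp only [List.length_map, List.length_range, heq]
      simp only [Nat.sub_self, List.getElem_singleton, Prod.mk.injEq]
      constructor
      · ring
      · rw [min_eq_right (by linarith : s ≤ (0 + (i:Int) + 1) * t)]

-- range(0, s, t) is empty for a negative step and nonnegative stop.
theorem pvRangeNegEmpty (s t : Int) (ht : t < 0) (hs : 0 ≤ s) :
    PySem.List.pyRange 0 s t = [] := by
  rw [PySem.List.pyRange_of_neg 0 s ht]
  simp [show ¬ s < 0 by omega]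

-- the ceil-division tile count is nonpositive for a negative step and nonnegative size.
theorem pvCeilDivNonpos (s t : Int) (ht : t < 0) (hs : 0 ≤ s) :
    pyCeilDiv s t ≤ 0 := by
  have h1 : PySem.Int.floordiv (-s) t = PySem.Int.floordiv s (-t) := by
    have := PySem.Int.floordiv_neg_neg s (-t)
    simpa using this
  have h2 : PySem.Int.floordiv s (-t) = s / (-t) :=
    PySem.Int.floordiv_eq_ediv_of_pos (by omega)
  have h3 : 0 ≤ s / (-t) := Int.ediv_nonneg hs (by omega)
  unfold pyCeilDiv
  omega

-- ===== VERDICT (by name: the statement is the Claim_ definition above) =====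
theorem getTilingRegions_spec : Claim_equal_getTilingRegions := by
  intro x y t _ hpre
  obtain ⟨ht0, hcase⟩ := hpre
  unfold Spec_getTilingRegions getTilingRegions getTilingRegions_alt
  by_cases ht : 0 < t
  · by_cases hrx : PySem.List.pyRange 0 x t = []
    · have hX := pvAxisPairs x t ht
      rw [hrx] at hX
      simp only [List.nil_append, List.tail_cons, List.zip_nil_right] at hX
      simp [hrx, List.map_eq_nil_iff.mp hX.symm, List.foldl_fixed]
    · by_cases hry : PySem.List.pyRange 0 y t = []
      · have hY := pvAxisPairs y t ht
        rw [hry] at hY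
        simp only [List.nil_append, List.tail_cons, List.zip_nil_right] at hY
        simp [hry, List.map_eq_nil_iff.mp hY.symm]
      · simp only [pvAxisPairs x t ht, pvAxisPairs y t ht,
          PySem.List.foldl_append_singleton_eq_map, PySem.List.foldl_append_eq_flatMap,
          List.flatMap_map, List.map_map, List.nil_append, Function.comp_def,
          if_neg (not_or.mpr ⟨hrx, hry⟩)]
  · have ht' : t < 0 := by omega
    rcases hcase with h | hx | hy
    · omega
    · simp [pvRangeNegEmpty x t ht' hx,
        PySem.List.pyRange_one_eq_nil (pvCeilDivNonpos x t ht' hx), List.foldl_fixed]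
    · simp [pvRangeNegEmpty y t ht' hy,
        PySem.List.pyRange_one_eq_nil (pvCeilDivNonpos y t ht' hy)]
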